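-- pv_equiv track=rewrite | github.com/SONG-36/ChipSelect-Data-Cleaning | src/resolve/field_resolver.py | resolve_package
-- ===== SOURCE A (Python) =====
-- from typing import List, Dict, Optional
--
-- def resolve_package(cands: List[Dict]) -> Optional[str]:
--     """封装：白名单 + 取出现频率最高"""
--     allow = ("lqfp", "qfn", "bga")
--     freq = {}
--     for c in cands:
--         p = c["candidate"].upper()
--         if p.lower().startswith(allow):
--             freq[p] = freq.get(p, 0) + 1
--     if not freq:
--         return None
--     return sorted(freq.items(), key=lambda x: -x[1])[0][0]
-- ===== SOURCE B (Python) =====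
-- def resolve_package(cands):
--     allow = ("lqfp", "qfn", "bga")
--     filtered = [p for c in cands
--                 for p in [c["candidate"].upper()]
--                 if any(p.lower().startswith(a) for a in allow)]
--     if not filtered:
--         return None
--     top = max(filtered.count(p) for p in filtered)
--     for p in filtered:
--         if filtered.count(p) == top:
--             return p
-- ===== Notes on version B (the rewrite author's own statement) =====
-- stated objective: alternative
-- what changed: Drops A's frequency dict and the descending sort of its items: B builds a filtered list by comprehension, takes the maximum occurrence count, and returns the first element attaining it.
import Mathlib
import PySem

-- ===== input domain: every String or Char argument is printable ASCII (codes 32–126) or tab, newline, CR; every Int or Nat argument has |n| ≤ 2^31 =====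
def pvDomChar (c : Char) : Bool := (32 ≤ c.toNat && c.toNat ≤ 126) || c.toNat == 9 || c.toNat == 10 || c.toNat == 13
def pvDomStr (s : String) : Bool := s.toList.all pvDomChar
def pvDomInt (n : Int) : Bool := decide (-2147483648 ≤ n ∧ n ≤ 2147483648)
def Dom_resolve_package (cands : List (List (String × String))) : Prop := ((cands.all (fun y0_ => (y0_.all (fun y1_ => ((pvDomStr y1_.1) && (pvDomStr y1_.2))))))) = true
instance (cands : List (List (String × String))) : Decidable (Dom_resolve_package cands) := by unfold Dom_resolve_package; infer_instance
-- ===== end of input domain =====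

-- B replaces A's frequency dict + descending sort by a filtered list, the maximum occurrence count,
-- and the first element attaining it (alternative decomposition, same return value).

-- ===== PORT A =====
-- literal port of A: build freq dict over the whitelist-filtered upper-cased candidates,
-- then take the first item of freq.items sorted by descending count.
def resolve_package (cands : List (List (String × String))) : Option String :=
  (cands.foldl
    (fun acc c =>
      acc.bind fun freq =>
        ((PySem.Dict.mk c).get? "candidate").map fun s =>
          let p := PySem.Str.upper s
          if PySem.Str.startswith (PySem.Str.lower p) "lqfp"
              || PySem.Str.startswith (PySem.Str.lower p) "qfn"
              || PySem.Str.startswith (PySem.Str.lower p) "bga" then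
            freq.insert p (freq.getD p 0 + 1)
          else freq)
    (some PySem.Dict.empty)).bind fun freq =>
      if freq.items = [] then none
      else
        match PySem.List.sorted freq.items (fun x => -x.2) false with
        | [] => none
        | x :: _ => some x.1

-- ===== PORT B =====
-- B-side helper: `any(p.lower().startswith(a) for a in allow)` from Source B
def allowedB (p : String) : Bool :=
  ["lqfp", "qfn", "bga"].any (fun a => PySem.Str.startswith (PySem.Str.lower p) a)

-- B-side helper: the list comprehension of Source B, elementwise recursion (KeyError → none)
def filteredB : List (List (String × String)) → Option (List String)
  | [] => some []
  | c :: cs =>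
    match (PySem.Dict.mk c).get? "candidate" with
    | none => none
    | some s =>
      let p := PySem.Str.upper s
      (filteredB cs).map fun rest => if allowedB p then p :: rest else rest

-- literal port of Source B: comprehension, max of the counts, first element with that count.
def resolve_package_alt (cands : List (List (String × String))) : Option String :=
  match filteredB cands with
  | none => none
  | some filtered =>
    if filtered = [] then none
    else
      match PySem.List.max? (filtered.map (fun p => (filtered.count p : Int))) (fun v => v) with
      | none => none
      | some top => filtered.find? (fun p => (filtered.count p : Int) == top)

-- ===== PRECONDITION & SPEC =====
-- Pre_ excludes dicts without a "candidate" key, on which A (and B) raise KeyError.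
def Pre_resolve_package (cands : List (List (String × String))) : Prop :=
  (cands.all (fun c => (PySem.Dict.mk c).contains "candidate")) = true
instance (cands : List (List (String × String))) : Decidable (Pre_resolve_package cands) := by unfold Pre_resolve_package; infer_instance

def pvWitness_resolve_package : (List (List (String × String))) :=
  [[("candidate", "lqfp-64")], [("candidate", "QFN12")], [("candidate", "xyz")]]

def Spec_resolve_package (cands : List (List (String × String))) (out : Option String) : Prop := out = resolve_package_alt cands
instance (cands : List (List (String × String))) (out : Option String) : Decidable (Spec_resolve_package cands out) := by unfold Spec_resolve_package; infer_instance

-- ===== CLAIM (what is proved, stated in full; the proofs are below) =====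
def Claim_equal_resolve_package : Prop := ∀ (cands : List (List (String × String))), Dom_resolve_package cands → Pre_resolve_package cands → Spec_resolve_package cands (resolve_package cands)

-- ===== LEMMAS AND PROOFS =====

-- the filtered, upper-cased candidate list both programs are about (A's inlined whitelist test)
def pickList : List (List (String × String)) → List String
  | [] => []
  | c :: cs =>
    match (PySem.Dict.mk c).get? "candidate" with
    | none => pickList cs
    | some s =>
      if PySem.Str.startswith (PySem.Str.lower (PySem.Str.upper s)) "lqfp"
          || PySem.Str.startswith (PySem.Str.lower (PySem.Str.upper s)) "qfn"
          || PySem.Str.startswith (PySem.Str.lower (PySem.Str.upper s)) "bga" then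
        PySem.Str.upper s :: pickList cs
      else pickList cs

-- B's `any` over the literal whitelist is A's inlined disjunction
theorem allowedB_eq (p : String) :
    allowedB p = (PySem.Str.startswith (PySem.Str.lower p) "lqfp"
      || PySem.Str.startswith (PySem.Str.lower p) "qfn"
      || PySem.Str.startswith (PySem.Str.lower p) "bga") := by
  simp [allowedB, Bool.or_assoc]

-- B's comprehension computes pickList under Pre_
theorem filteredB_eq (cands : List (List (String × String)))
    (h : Pre_resolve_package cands) :
    filteredB cands = some (pickList cands) := by
  induction cands with
  | nil => rfl
  | cons c cs ih =>
    unfold Pre_resolve_package at h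
    simp only [List.all_cons, Bool.and_eq_true] at h
    obtain ⟨hc, hcs⟩ := h
    rw [PySem.Dict.contains_eq_isSome_get?] at hc
    cases hv : (PySem.Dict.mk c).get? "candidate" with
    | none => rw [hv] at hc; simp at hc
    | some s =>
      simp only [filteredB, pickList, hv, ih hcs, Option.map_some, allowedB_eq]

-- A's loop builds exactly the counting fold over pickList
theorem foldA_eq (cands : List (List (String × String)))
    (h : Pre_resolve_package cands) (d : PySem.Dict String Int) :
    cands.foldl
      (fun acc c =>
        acc.bind fun freq =>
          ((PySem.Dict.mk c).get? "candidate").map fun s =>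
            let p := PySem.Str.upper s
            if PySem.Str.startswith (PySem.Str.lower p) "lqfp"
                || PySem.Str.startswith (PySem.Str.lower p) "qfn"
                || PySem.Str.startswith (PySem.Str.lower p) "bga" then
              freq.insert p (freq.getD p 0 + 1)
            else freq)
      (some d)
    = some ((pickList cands).foldl (fun freq p => freq.insert p (freq.getD p 0 + 1)) d) := by
  induction cands generalizing d with
  | nil => rfl
  | cons c cs ih =>
    unfold Pre_resolve_package at h
    simp only [List.all_cons, Bool.and_eq_true] at h
    obtain ⟨hc, hcs⟩ := h
    rw [PySem.Dict.contains_eq_isSome_get?] at hc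
    cases hv : (PySem.Dict.mk c).get? "candidate" with
    | none => rw [hv] at hc; simp at hc
    | some s =>
      simp only [List.foldl_cons, Option.bind_some, hv, Option.map_some, pickList]
      by_cases hg : (PySem.Str.startswith (PySem.Str.lower (PySem.Str.upper s)) "lqfp"
          || PySem.Str.startswith (PySem.Str.lower (PySem.Str.upper s)) "qfn"
          || PySem.Str.startswith (PySem.Str.lower (PySem.Str.upper s)) "bga") = true
      · simp only [hg, if_true, List.foldl_cons]
        exact ih hcs _
      · rw [Bool.not_eq_true] at hg
        simp only [hg, Bool.false_eq_true, if_false]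
        exact ih hcs _

-- head of the stable sort is the running first-minimum (min?)
theorem head_foldl_insertBy {α : Type} (key : α → Int) (l : List α) (acc : List α) :
    (l.foldl (fun a x => PySem.List.insertBy (fun a b => decide (key a < key b)) x a) acc).head?
    = l.foldl
        (fun m x => match m with
          | none => some x
          | some m => if key x < key m then some x else some m)
        acc.head? := by
  induction l generalizing acc with
  | nil => rfl
  | cons x t ih =>
    simp only [List.foldl_cons]
    rw [ih]
    congr 1
    cases acc with
    | nil => rfl
    | cons y ys =>
      simp only [PySem.List.insertBy, List.head?_cons]
      by_cases h : key x < key y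
      · simp [h]
      · simp [h]

theorem sorted_head?_eq_min? {α : Type} (l : List α) (key : α → Int) :
    (PySem.List.sorted l key false).head? = PySem.List.min? l key := by
  rw [PySem.List.sorted_eq_foldl_insertBy l key, head_foldl_insertBy key l []]
  rfl

-- min? over a mapped list
theorem min?_map {α β : Type} (g : α → β) (key : β → Int) (l : List α) :
    PySem.List.min? (l.map g) key = (PySem.List.min? l (fun x => key (g x))).map g := by
  unfold PySem.List.min?
  rw [List.foldl_map]
  have main : ∀ (t : List α) (a : Option α),
      t.foldl (fun b x => match b with
        | none => some (g x)
        | some m => if key (g x) < key m then some (g x) else some m) (a.map g)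
      = (t.foldl (fun b x => match b with
        | none => some x
        | some m => if key (g x) < key (g m) then some x else some m) a).map g := by
    intro t
    induction t with
    | nil => intro a; rfl
    | cons x t ih =>
      intro a
      simp only [List.foldl_cons]
      cases a with
      | none =>
        rw [show (match Option.map g (none : Option α) with
              | none => some (g x)
              | some m => if key (g x) < key m then some (g x) else some m) = Option.map g (some x) from rfl]
        exact ih (some x)
      | some m =>
        simp only [Option.map_some]
        by_cases h : key (g x) < key (g m)
        · rw [if_pos h, if_pos h, show some (g x) = Option.map g (some x) from rfl]
          exact ih (some x)
        · rw [if_neg h, if_neg h, show some (g m) = Option.map g (some m) from rfl]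
          exact ih (some m)
  exact main l none

-- max? over a mapped list (B's max of the count generator)
theorem max?_map {α β : Type} (g : α → β) (key : β → Int) (l : List α) :
    PySem.List.max? (l.map g) key = (PySem.List.max? l (fun x => key (g x))).map g := by
  unfold PySem.List.max?
  rw [List.foldl_map]
  have main : ∀ (t : List α) (a : Option α),
      t.foldl (fun b x => match b with
        | none => some (g x)
        | some m => if key m < key (g x) then some (g x) else some m) (a.map g)
      = (t.foldl (fun b x => match b with
        | none => some x
        | some m => if key (g m) < key (g x) then some x else some m) a).map g := by
    intro t
    induction t with
    | nil => intro a; rfl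
    | cons x t ih =>
      intro a
      simp only [List.foldl_cons]
      cases a with
      | none =>
        rw [show (match Option.map g (none : Option α) with
              | none => some (g x)
              | some m => if key m < key (g x) then some (g x) else some m) = Option.map g (some x) from rfl]
        exact ih (some x)
      | some m =>
        simp only [Option.map_some]
        by_cases h : key (g m) < key (g x)
        · rw [if_pos h, if_pos h, show some (g x) = Option.map g (some x) from rfl]
          exact ih (some x)
        · rw [if_neg h, if_neg h, show some (g m) = Option.map g (some m) from rfl]
          exact ih (some m)
  exact main l none

-- minimizing the negated key is maximizing the key (same tie-breaking)
theorem min?_neg_eq_max? {α : Type} (f : α → Int) (l : List α) :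
    PySem.List.min? l (fun x => -(f x)) = PySem.List.max? l f := by
  unfold PySem.List.min? PySem.List.max?
  congr 1
  funext m x
  cases m with
  | none => rfl
  | some m => simp [neg_lt_neg_iff]

-- max? is unchanged by ordered deduplication (the key is a function of the element)
theorem max?_ofList {α : Type} [BEq α] [LawfulBEq α] (key : α → Int) (ws : List α) :
    PySem.List.max? (PySem.Set.ofList ws) key = PySem.List.max? ws key := by
  induction ws using List.reverseRecOn with
  | nil => rfl
  | append_singleton ys x ih =>
    have hof : PySem.Set.ofList (ys ++ [x]) = PySem.Set.add (PySem.Set.ofList ys) x := by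
      rw [PySem.Set.ofList_eq_foldl, PySem.Set.ofList_eq_foldl, List.foldl_append]
      rfl
    have hmaxapp : ∀ (l : List α), PySem.List.max? (l ++ [x]) key =
        (match PySem.List.max? l key with
          | none => some x
          | some m => if key m < key x then some x else some m) := by
      intro l
      unfold PySem.List.max?
      rw [List.foldl_append]
      rfl
    rw [hof, hmaxapp ys, PySem.Set.add]
    by_cases hc : (PySem.Set.ofList ys).contains x = true
    · rw [if_pos hc, ih]
      have hx : x ∈ ys := by
        rw [← PySem.Set.mem_ofList ys x]
        exact List.contains_iff_mem.mp hc
      have hne : ys ≠ [] := by intro h; rw [h] at hx; exact absurd hx (List.not_mem_nil)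
      cases hm : PySem.List.max? ys key with
      | none => exact absurd ((PySem.List.max?_eq_none_iff ys key).mp hm) hne
      | some m =>
        have hle := PySem.List.max?_isMax hm x hx
        simp only [not_lt.mpr hle, if_false]
    · rw [if_neg hc, hmaxapp, ih]

-- ofList of a nonempty list is nonempty
theorem ofList_ne_nil {α : Type} [BEq α] [LawfulBEq α] (a : α) (t : List α) :
    PySem.Set.ofList (a :: t) ≠ [] := by
  intro h
  have hmem : a ∈ PySem.Set.ofList (a :: t) := (PySem.Set.mem_ofList _ _).mpr (by simp)
  rw [h] at hmem
  exact absurd hmem (List.not_mem_nil)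

-- the first maximal element is the first element whose key attains the maximal key
theorem max?_foldl_find {α : Type} (key : α → Int) :
    ∀ (t : List α) (a m : α),
      t.foldl (fun acc x => match acc with
        | none => some x
        | some m => if key m < key x then some x else some m) (some a) = some m →
      (m = a ∧ ∀ x ∈ t, key x ≤ key a) ∨
      (key a < key m ∧ t.find? (fun x => key x == key m) = some m) := by
  intro t
  induction t with
  | nil =>
    intro a m h
    simp only [List.foldl_nil, Option.some.injEq] at h
    exact Or.inl ⟨h.symm, by simp⟩
  | cons x t ih =>
    intro a m h
    simp only [List.foldl_cons] at h
    by_cases hx : key a < key x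
    · rw [if_pos hx] at h
      rcases ih x m h with ⟨hm, hall⟩ | ⟨hlt, hfind⟩
      · subst hm
        refine Or.inr ⟨hx, ?_⟩
        simp only [List.find?_cons, beq_self_eq_true]
      · refine Or.inr ⟨lt_trans hx hlt, ?_⟩
        rw [List.find?_cons_of_neg, hfind]
        simp only [beq_iff_eq]
        exact ne_of_lt hlt
    · rw [if_neg hx] at h
      rcases ih a m h with ⟨hm, hall⟩ | ⟨hlt, hfind⟩
      · subst hm
        refine Or.inl ⟨rfl, ?_⟩
        intro y hy
        rcases List.mem_cons.mp hy with rfl | hy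
        · exact le_of_not_gt hx
        · exact hall y hy
      · refine Or.inr ⟨hlt, ?_⟩
        rw [List.find?_cons_of_neg, hfind]
        simp only [beq_iff_eq]
        exact ne_of_lt (lt_of_le_of_lt (le_of_not_gt hx) hlt)

theorem max?_eq_find {α : Type} (key : α → Int) (l : List α) (m : α)
    (h : PySem.List.max? l key = some m) :
    l.find? (fun x => key x == key m) = some m := by
  cases l with
  | nil => simp [PySem.List.max?] at h
  | cons a t =>
    have h' : t.foldl (fun acc x => match acc with
        | none => some x
        | some m => if key m < key x then some x else some m) (some a) = some m := h
    rcases max?_foldl_find key t a m h' with ⟨hm, _⟩ | ⟨hlt, hfind⟩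
    · subst hm
      simp only [List.find?_cons, beq_self_eq_true]
    · rw [List.find?_cons_of_neg, hfind]
      simp only [beq_iff_eq]
      exact ne_of_lt hlt

-- ===== VERDICT (by name: the statement is the Claim_ definition above) =====
theorem resolve_package_spec : Claim_equal_resolve_package := by
  intro cands _ hpre
  unfold Spec_resolve_package resolve_package resolve_package_alt
  rw [foldA_eq cands hpre _, filteredB_eq cands hpre]
  simp only [Option.bind_some]
  rw [PySem.Dict.foldl_insert_getD_add_one_eq_counter]
  cases hwsc : pickList cands with
  | nil => rfl
  | cons a t =>
    have hitems := PySem.Dict.items_counter (a :: t)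
    have hne : (PySem.Dict.counter (a :: t)).items ≠ [] := by
      rw [hitems]
      simp only [ne_eq, List.map_eq_nil_iff]
      exact ofList_ne_nil a t
    rw [if_neg hne, if_neg (by simp)]
    have hhead :
        (PySem.List.sorted (PySem.Dict.counter (a :: t)).items (fun x => -x.2) false).head?
        = (PySem.List.max? (a :: t) (fun p => ((a :: t).count p : Int))).map
            (fun k => (k, ((a :: t).count k : Int))) := by
      rw [sorted_head?_eq_min?, hitems,
        min?_map (fun k : String => (k, ((a :: t).count k : Int))) (fun x => -x.2) (PySem.Set.ofList (a :: t)),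
        min?_neg_eq_max? (fun p : String => ((a :: t).count p : Int)),
        max?_ofList]
    cases hmx : PySem.List.max? (a :: t) (fun p : String => ((a :: t).count p : Int)) with
    | none =>
      exact absurd ((PySem.List.max?_eq_none_iff _ _).mp hmx) (by simp)
    | some m =>
      rw [hmx] at hhead
      simp only [Option.map_some] at hhead
      -- B's top is the count of m
      have htop : PySem.List.max? ((a :: t).map (fun p => ((a :: t).count p : Int))) (fun v => v)
          = some (((a :: t).count m : Int)) := by
        rw [max?_map (fun p : String => ((a :: t).count p : Int)) (fun v => v) (a :: t)]
        rw [hmx]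
        rfl
      rw [htop]
      -- B's find returns m
      have hfind : List.find? (fun p => ((a :: t).count p : Int) == ((a :: t).count m : Int)) (a :: t) = some m :=
        max?_eq_find (fun p : String => ((a :: t).count p : Int)) (a :: t) m hmx
      -- A's head is (m, count m)
      cases hs : PySem.List.sorted (PySem.Dict.counter (a :: t)).items (fun x => -x.2) false with
      | nil => rw [hs] at hhead; simp at hhead
      | cons y ys =>
        rw [hs] at hhead
        simp only [List.head?_cons, Option.some.injEq] at hhead
        rw [hhead]
        exact hfind.symm
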